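-- pv_equiv track=rewrite | github.com/huytruong1810/Spring-2020-Projects | DecisionTreeLearner/hw12.py | get_types_of_values
-- ===== SOURCE A (Python) =====
-- def remove_dup (ls):
--     ''' Removes duplicates from a list of values '''
--     result = []
--     for i in ls:
--         if not i in result:
--             result.append(i)
--     return result
--
-- def get_types_of_values (examples):
--     ''' Returns the types of values presented in the dataset '''
--     types_of_values = []
--     # collect each list of values of each attributes in examples
--     for i in range(len(examples[0])):
--         ls = [] # make an empty list
--         for e in examples:
--             ls.append(e[i])
--         # extract different type of values in that list and save it
--         types_of_values.append(remove_dup(ls))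
--     return types_of_values
-- ===== SOURCE B (Python) =====
-- def get_types_of_values(examples):
--     ''' Returns the types of values presented in the dataset '''
--     types_of_values = [[] for _ in range(len(examples[0]))]
--     # single row-major pass: push each cell into its column's list unless seen
--     for e in examples:
--         for i, seen in enumerate(types_of_values):
--             v = e[i]
--             if v not in seen:
--                 seen.append(v)
--     return types_of_values
-- ===== Notes on version B (the rewrite author's own statement) =====
-- stated objective: simpler
-- what changed: Drops the remove_dup helper and the column-by-column transpose: B makes one row-major pass over examples, maintaining per-column distinct-value lists directly (append on first occurrence).
import Mathlib
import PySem

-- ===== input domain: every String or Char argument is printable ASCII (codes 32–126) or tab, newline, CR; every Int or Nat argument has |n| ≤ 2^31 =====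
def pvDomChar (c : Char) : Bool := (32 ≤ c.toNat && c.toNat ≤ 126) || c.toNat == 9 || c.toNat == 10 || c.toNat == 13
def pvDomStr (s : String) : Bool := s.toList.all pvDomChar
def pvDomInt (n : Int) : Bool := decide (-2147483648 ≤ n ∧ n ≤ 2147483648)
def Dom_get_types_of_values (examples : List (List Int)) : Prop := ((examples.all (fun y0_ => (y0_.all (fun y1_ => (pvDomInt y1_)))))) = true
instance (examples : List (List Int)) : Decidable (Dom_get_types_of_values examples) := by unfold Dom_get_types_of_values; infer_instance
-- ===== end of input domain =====

-- B is a simpler single-pass (row-major) re-implementation of A's column-by-column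
-- transpose + remove_dup; equal return value on Pre_ (where the Python A returns).

-- ===== PORT A =====
-- remove_dup: keeps first occurrence of each value, in order
def removeDup (ls : List Int) : List Int :=
  ls.foldl (fun result i => if i ∈ result then result else result ++ [i]) []

-- A: for i in range(len(examples[0])): build column i by appending e[i], then dedup it.
-- e[i] is ported as (pyGet? e i).getD 0; inside Pre_ the index is always in range so
-- the default 0 is never used (outside Pre_ the Python raises IndexError).
def get_types_of_values (examples : List (List Int)) : List (List Int) :=
  (List.range (examples.headD []).length).foldl
    (fun tys (i : Nat) =>
      tys ++ [removeDup (examples.foldl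
        (fun ls e => ls ++ [(PySem.List.pyGet? e (i : Int)).getD 0]) [])])
    []

-- ===== PORT B =====
-- B: one row-major pass; per-column distinct lists maintained directly.
def get_types_of_values_alt (examples : List (List Int)) : List (List Int) :=
  examples.foldl
    (fun res e =>
      (PySem.List.enumerate res 0).map (fun p =>
        let v := (PySem.List.pyGet? e p.1).getD 0
        if v ∈ p.2 then p.2 else p.2 ++ [v]))
    (List.replicate (examples.headD []).length [])

-- ===== PRECONDITION & SPEC =====
-- Pre_ excludes exactly the inputs where the Python A raises IndexError:
-- empty examples (examples[0]) and rows shorter than the first row (e[i]).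
def Pre_get_types_of_values (examples : List (List Int)) : Prop :=
  examples ≠ [] ∧ ∀ e ∈ examples, (examples.headD []).length ≤ e.length
instance (examples : List (List Int)) : Decidable (Pre_get_types_of_values examples) := by
  unfold Pre_get_types_of_values; infer_instance

def pvWitness_get_types_of_values : List (List Int) := [[1, 2], [1, 3], [2, 2]]

def Spec_get_types_of_values (examples : List (List Int)) (out : List (List Int)) : Prop := out = get_types_of_values_alt examples
instance (examples : List (List Int)) (out : List (List Int)) : Decidable (Spec_get_types_of_values examples out) := by unfold Spec_get_types_of_values; infer_instance

-- ===== CLAIM (what is proved, stated in full; the proofs are below) =====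
def Claim_equal_get_types_of_values : Prop := ∀ (examples : List (List Int)), Dom_get_types_of_values examples → Pre_get_types_of_values examples → Spec_get_types_of_values examples (get_types_of_values examples)

-- ===== LEMMAS AND PROOFS =====

-- cell access shared by both characterisations
def pvCell (e : List Int) (i : Nat) : Int := (PySem.List.pyGet? e (i : Int)).getD 0

def pvCol (rows : List (List Int)) (i : Nat) : List Int := rows.map (fun e => pvCell e i)

theorem foldl_append_map {α β : Type} (l : List α) (f : α → β) :
    ∀ acc : List β, l.foldl (fun a e => a ++ [f e]) acc = acc ++ l.map f := by
  induction l with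
  | nil => simp
  | cons x xs ih => intro acc; simp [List.foldl, ih]

theorem removeDup_append_one (xs : List Int) (v : Int) :
    removeDup (xs ++ [v]) =
      if v ∈ removeDup xs then removeDup xs else removeDup xs ++ [v] := by
  simp [removeDup, List.foldl_append]

theorem a_characterisation (examples : List (List Int)) :
    get_types_of_values examples =
      (List.range (examples.headD []).length).map (fun i => removeDup (pvCol examples i)) := by
  unfold get_types_of_values
  have h1 : ∀ i : Nat,
      examples.foldl (fun ls e => ls ++ [(PySem.List.pyGet? e (i : Int)).getD 0]) []
        = pvCol examples i := by
    intro i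
    simpa [pvCol, pvCell] using
      foldl_append_map examples (fun e => (PySem.List.pyGet? e (i : Int)).getD 0) []
  have hf : (fun (tys : List (List Int)) (i : Nat) => tys ++
        [removeDup (examples.foldl
          (fun ls e => ls ++ [(PySem.List.pyGet? e (i : Int)).getD 0]) [])])
      = (fun tys i => tys ++ [removeDup (pvCol examples i)]) :=
    funext fun tys => funext fun i => by rw [h1]
  rw [hf]
  simpa using foldl_append_map (List.range (examples.headD []).length)
    (fun i => removeDup (pvCol examples i)) []

theorem b_step (n : Nat) (done : List (List Int)) (e : List Int) :
    ((PySem.List.enumerate ((List.range n).map (fun i => removeDup (pvCol done i))) 0).map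
      (fun p =>
        let v := (PySem.List.pyGet? e p.1).getD 0
        if v ∈ p.2 then p.2 else p.2 ++ [v]))
    = (List.range n).map (fun i => removeDup (pvCol (done ++ [e]) i)) := by
  apply List.ext_getElem
  · simp [PySem.List.length_enumerate]
  · intro j hj hj'
    simp only [List.getElem_map, PySem.List.getElem_enumerate, List.getElem_range]
    have : pvCol (done ++ [e]) j = pvCol done j ++ [pvCell e j] := by
      simp [pvCol]
    rw [this, removeDup_append_one]
    simp [pvCell]

theorem b_invariant (n : Nat) (rows : List (List Int)) :
    ∀ done : List (List Int),
      rows.foldl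
        (fun res e =>
          (PySem.List.enumerate res 0).map (fun p =>
            let v := (PySem.List.pyGet? e p.1).getD 0
            if v ∈ p.2 then p.2 else p.2 ++ [v]))
        ((List.range n).map (fun i => removeDup (pvCol done i)))
      = (List.range n).map (fun i => removeDup (pvCol (done ++ rows) i)) := by
  induction rows with
  | nil => intro done; simp
  | cons e rest ih =>
    intro done
    simp only [List.foldl_cons]
    rw [b_step n done e, ih (done ++ [e])]
    simp

theorem b_characterisation (examples : List (List Int)) :
    get_types_of_values_alt examples =
      (List.range (examples.headD []).length).map (fun i => removeDup (pvCol examples i)) := by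
  unfold get_types_of_values_alt
  have hinit : List.replicate (examples.headD []).length ([] : List Int)
      = (List.range (examples.headD []).length).map (fun i => removeDup (pvCol ([] : List (List Int)) i)) := by
    simp [pvCol, removeDup]
  rw [hinit]
  simpa using b_invariant (examples.headD []).length examples []

-- ===== VERDICT (by name: the statement is the Claim_ definition above) =====
theorem get_types_of_values_spec : Claim_equal_get_types_of_values := by
  intro examples _ _
  unfold Spec_get_types_of_values
  rw [a_characterisation, b_characterisation]
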